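-- pv_equiv track=rewrite | github.com/fcontr1975/Blender-Flightgear-BTG-Import-Export | src/fg_btg_materials.py | _material_candidates
-- ===== SOURCE A (Python) =====
-- TEXTURE_ALIASES = {
--     "airport": ["airport"],
--     "default": ["grass", "airport"],
--     "grass": ["grass"],
--     "grasscover": ["grass"],
--     "grassland": ["grass"],
--     "intermittentstream": ["waterlake"],
--     "stream": ["waterlake"],
--     "canal": ["waterlake"],
--     "lake": ["waterlake", "frozenlake"],
--     "road": ["asphalt", "gravel"],
--     "freeway": ["asphalt"],
--     "railroad": ["gravel", "darkgravel"],
--     "drycrop": ["drycrop"],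
--     "mixedcrop": ["mixedcrop"],
--     "irrcroppasturecover": ["irrcrop", "cropgrass"],
--     "irrcrop": ["irrcrop"],
--     "deciduousforest": ["deciduous", "forest"],
--     "evergreenforest": ["evergreen", "coniferousforest"],
--     "scrub": ["shrub", "scrub"],
--     "scrubcover": ["shrub", "scrub"],
--     "urban": ["industrial", "city"],
--     "pctiedown": ["asphalt", "carpark"],
-- }
--
-- def _normalize_key(value):
--     return "".join(ch for ch in value.lower() if ch.isalnum())
--
-- def _material_candidates(material_name):
--     normalized = _normalize_key(material_name)
--     candidates = [normalized]
--
--     if normalized in TEXTURE_ALIASES: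
--         candidates.extend(_normalize_key(name) for name in TEXTURE_ALIASES[normalized])
--
--     token = []
--     for ch in material_name:
--         if ch.isupper() and token:
--             piece = _normalize_key("".join(token))
--             if len(piece) > 2:
--                 candidates.append(piece)
--             token = [ch]
--         elif ch.isalnum():
--             token.append(ch)
--         elif token:
--             piece = _normalize_key("".join(token))
--             if len(piece) > 2:
--                 candidates.append(piece)
--             token = []
--     if token:
--         piece = _normalize_key("".join(token))
--         if len(piece) > 2:
--             candidates.append(piece)
--
--     if normalized.startswith("pa"):
--         candidates.extend(["airport", "asphalt"])
--
--     deduped = []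
--     seen = set()
--     for candidate in candidates:
--         if candidate and candidate not in seen:
--             seen.add(candidate)
--             deduped.append(candidate)
--     return deduped
-- ===== SOURCE B (Python) =====
-- # B: tokenizer reorganized — instead of A's stateful buffer that flushes on
-- # uppercase/non-alnum, mark a boundary before every uppercase char and group
-- # the marked string into maximal alnum runs with itertools.groupby; dedup via
-- # dict.fromkeys instead of a seen-set loop.
-- from itertools import groupby
--
-- TEXTURE_ALIASES = {
--     "airport": ["airport"],
--     "default": ["grass", "airport"],
--     "grass": ["grass"],
--     "grasscover": ["grass"],
--     "grassland": ["grass"],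
--     "intermittentstream": ["waterlake"],
--     "stream": ["waterlake"],
--     "canal": ["waterlake"],
--     "lake": ["waterlake", "frozenlake"],
--     "road": ["asphalt", "gravel"],
--     "freeway": ["asphalt"],
--     "railroad": ["gravel", "darkgravel"],
--     "drycrop": ["drycrop"],
--     "mixedcrop": ["mixedcrop"],
--     "irrcroppasturecover": ["irrcrop", "cropgrass"],
--     "irrcrop": ["irrcrop"],
--     "deciduousforest": ["deciduous", "forest"],
--     "evergreenforest": ["evergreen", "coniferousforest"],
--     "scrub": ["shrub", "scrub"],
--     "scrubcover": ["shrub", "scrub"],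
--     "urban": ["industrial", "city"],
--     "pctiedown": ["asphalt", "carpark"],
-- }
--
-- def _normalize_key(value):
--     return "".join(ch for ch in value.lower() if ch.isalnum())
--
-- def _material_candidates(material_name):
--     normalized = _normalize_key(material_name)
--     candidates = [normalized]
--     if normalized in TEXTURE_ALIASES:
--         candidates += [_normalize_key(n) for n in TEXTURE_ALIASES[normalized]]
--     # mark a split point (a non-alnum separator) before every uppercase char,
--     # then the tokens are exactly the maximal alnum runs of the marked string
--     marked = "".join("\x00" + ch if ch.isupper() else ch for ch in material_name)
--     for is_run, grp in groupby(marked, key=str.isalnum):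
--         if is_run:
--             piece = _normalize_key("".join(grp))
--             if len(piece) > 2:
--                 candidates.append(piece)
--     if normalized.startswith("pa"):
--         candidates += ["airport", "asphalt"]
--     return list(dict.fromkeys(c for c in candidates if c))
-- ===== Notes on version B (the rewrite author's own statement) =====
-- stated objective: idiomatic
-- what changed: The tokenizer no longer keeps a stateful buffer flushed on uppercase/non-alnum chars: B marks a boundary before every uppercase char and groups the marked string into maximal alnum runs with itertools.groupby, and the final dedup uses dict.fromkeys instead of an explicit seen-set loop.
import Mathlib
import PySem

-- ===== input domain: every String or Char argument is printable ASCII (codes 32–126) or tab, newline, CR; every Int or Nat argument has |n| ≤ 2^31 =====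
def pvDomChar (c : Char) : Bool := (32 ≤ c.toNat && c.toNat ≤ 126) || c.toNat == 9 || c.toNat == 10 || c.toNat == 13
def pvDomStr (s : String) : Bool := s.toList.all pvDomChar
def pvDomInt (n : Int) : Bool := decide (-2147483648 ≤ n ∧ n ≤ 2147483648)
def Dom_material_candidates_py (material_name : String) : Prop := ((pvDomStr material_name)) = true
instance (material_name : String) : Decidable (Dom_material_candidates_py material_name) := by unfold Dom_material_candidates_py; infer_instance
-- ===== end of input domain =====

-- B reorganizes only the tokenizer (boundary-marking + run-grouping instead of a
-- stateful flush buffer) and the final dedup (dict.fromkeys instead of a seen-set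
-- loop); objective: idiomatic, same cost.

-- shared helpers (identical code in both Python files)
def normKey (value : String) : String :=
  String.mk ((PySem.Str.lower value).toList.filter PySem.Chars.isalnum)

def textureAliases : PySem.Dict String (List String) := PySem.Dict.ofList [
  ("airport", ["airport"]),
  ("default", ["grass", "airport"]),
  ("grass", ["grass"]),
  ("grasscover", ["grass"]),
  ("grassland", ["grass"]),
  ("intermittentstream", ["waterlake"]),
  ("stream", ["waterlake"]),
  ("canal", ["waterlake"]),
  ("lake", ["waterlake", "frozenlake"]),
  ("road", ["asphalt", "gravel"]),
  ("freeway", ["asphalt"]),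
  ("railroad", ["gravel", "darkgravel"]),
  ("drycrop", ["drycrop"]),
  ("mixedcrop", ["mixedcrop"]),
  ("irrcroppasturecover", ["irrcrop", "cropgrass"]),
  ("irrcrop", ["irrcrop"]),
  ("deciduousforest", ["deciduous", "forest"]),
  ("evergreenforest", ["evergreen", "coniferousforest"]),
  ("scrub", ["shrub", "scrub"]),
  ("scrubcover", ["shrub", "scrub"]),
  ("urban", ["industrial", "city"]),
  ("pctiedown", ["asphalt", "carpark"])]

-- "piece = _normalize_key(token); if len(piece) > 2: append(piece)" (both Pythons)
def emitPiece (token : List Char) : List String :=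
  let piece := normKey (String.mk token)
  if PySem.Str.len piece > 2 then [piece] else []

-- ===== PORT A =====
-- the body of A's "for ch in material_name" loop, state = (candidates, token)
def stepA (st : List String × List Char) (ch : Char) : List String × List Char :=
  let (candidates, token) := st
  if PySem.Chars.isupper ch && !token.isEmpty then
    (candidates ++ emitPiece token, [ch])
  else if PySem.Chars.isalnum ch then
    (candidates, token ++ [ch])
  else if !token.isEmpty then
    (candidates ++ emitPiece token, [])
  else
    (candidates, token)

-- "if candidate and candidate not in seen: seen.add; deduped.append"
def dedupStepA (st : List String × PySem.Set String) (c : String) :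
    List String × PySem.Set String :=
  if c != "" && !(PySem.Set.contains st.2 c) then
    (st.1 ++ [c], PySem.Set.add st.2 c)
  else st

def material_candidates_py (material_name : String) : List String :=
  let normalized := normKey material_name
  let candidates := [normalized]
  let candidates :=
    match textureAliases.get? normalized with
    | some names => candidates ++ names.map normKey
    | none => candidates
  let st := material_name.toList.foldl stepA (candidates, [])
  let candidates := st.1 ++ (if !st.2.isEmpty then emitPiece st.2 else [])
  let candidates :=
    if PySem.Str.startswith normalized "pa" then candidates ++ ["airport", "asphalt"]
    else candidates
  (candidates.foldl dedupStepA ([], PySem.Set.empty)).1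

-- ===== PORT B =====
-- '"".join("\x00" + ch if ch.isupper() else ch for ch in material_name)'
def markChars (cs : List Char) : List Char :=
  cs.flatMap (fun ch => if PySem.Chars.isupper ch then ['\x00', ch] else [ch])

-- hand-port of itertools.groupby(marked, key=str.isalnum): alnum runs become the
-- nonempty groups, every non-alnum char contributes an empty boundary group
def groupRaw (cs : List Char) : List (List Char) :=
  cs.foldr (fun c gs =>
    if PySem.Chars.isalnum c then
      match gs with
      | g :: t => (c :: g) :: t
      | [] => [[c]]
    else [] :: gs) [[]]

-- "if is_run:" — keep only the alnum groups
def groupRuns (cs : List Char) : List (List Char) :=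
  (groupRaw cs).filter (fun g => !g.isEmpty)

def material_candidates_py_alt (material_name : String) : List String :=
  let normalized := normKey material_name
  let candidates := [normalized]
  let candidates :=
    match textureAliases.get? normalized with
    | some names => candidates ++ names.map normKey
    | none => candidates
  let candidates := candidates ++ (groupRuns (markChars material_name.toList)).flatMap emitPiece
  let candidates :=
    if PySem.Str.startswith normalized "pa" then candidates ++ ["airport", "asphalt"]
    else candidates
  PySem.List.dedup (candidates.filter (fun c => c != ""))

-- ===== PRECONDITION & SPEC =====
def Spec_material_candidates_py (material_name : String) (out : List String) : Prop := out = material_candidates_py_alt material_name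
instance (material_name : String) (out : List String) : Decidable (Spec_material_candidates_py material_name out) := by unfold Spec_material_candidates_py; infer_instance

-- ===== CLAIM (what is proved, stated in full; the proofs are below) =====
def Claim_equal_material_candidates_py : Prop := ∀ (material_name : String), Dom_material_candidates_py material_name → Spec_material_candidates_py material_name (material_candidates_py material_name)

-- ===== LEMMAS AND PROOFS =====

theorem isupper_isalnum {c : Char} (h : PySem.Chars.isupper c = true) :
    PySem.Chars.isalnum c = true := by
  simp [PySem.Chars.isalnum, PySem.Chars.isalpha]
  exact Or.inl (Or.inl h)

theorem groupRaw_ne_nil (cs : List Char) : groupRaw cs ≠ [] := by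
  induction cs with
  | nil => simp [groupRaw]
  | cons c rest ih =>
    simp only [groupRaw, List.foldr_cons] at *
    split
    · split <;> simp
    · simp

theorem emitPiece_nil : emitPiece [] = [] := by decide

-- A's token loop followed by the final flush = emitting the groups of the marked
-- string, with the pending token prepended to the first group.
theorem tok_loop_eq (cs : List Char) : ∀ (cands : List String) (tok : List Char),
    (cs.foldl stepA (cands, tok)).1
      ++ (if !(cs.foldl stepA (cands, tok)).2.isEmpty
          then emitPiece (cs.foldl stepA (cands, tok)).2 else []) =
    cands ++
      (match groupRaw (markChars cs) with
       | g :: t => ((tok ++ g) :: t).flatMap emitPiece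
       | [] => emitPiece tok) := by
  induction cs with
  | nil =>
    intro cands tok
    simp only [List.foldl_nil, groupRaw, markChars, List.flatMap_nil, List.foldr_nil]
    simp only [List.flatMap_cons, List.flatMap_nil, List.append_nil]
    cases tok <;> simp [emitPiece_nil]
  | cons c rest ih =>
    intro cands tok
    have hmark : markChars (c :: rest)
        = (if PySem.Chars.isupper c then ['\x00', c] else [c]) ++ markChars rest := by
      simp [markChars]
    rw [List.foldl_cons]
    by_cases hu : PySem.Chars.isupper c = true
    · have han : PySem.Chars.isalnum c = true := isupper_isalnum hu
      have hraw : groupRaw (markChars (c :: rest))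
          = [] :: (match groupRaw (markChars rest) with
                   | g :: t => (c :: g) :: t
                   | [] => [[c]]) := by
        rw [hmark, if_pos hu]
        show groupRaw ('\x00' :: c :: markChars rest) = _
        simp only [groupRaw, List.foldr_cons]
        have h0 : PySem.Chars.isalnum '\x00' = false := by decide
        rw [han, h0]
        simp
      cases htok : tok with
      | nil =>
        have hst : stepA (cands, []) c = (cands, [c]) := by
          simp [stepA, han, hu]
        rw [hst, ih]
        rw [hraw]
        cases hg : groupRaw (markChars rest) with
        | nil => exact absurd hg (groupRaw_ne_nil _)
        | cons g t => simp [emitPiece_nil]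
      | cons x xs =>
        have hst : stepA (cands, x :: xs) c = (cands ++ emitPiece (x :: xs), [c]) := by
          simp [stepA, hu]
        rw [hst, ih]
        rw [hraw]
        cases hg : groupRaw (markChars rest) with
        | nil => exact absurd hg (groupRaw_ne_nil _)
        | cons g t => simp
    · by_cases han : PySem.Chars.isalnum c = true
      · have hraw : groupRaw (markChars (c :: rest))
            = (match groupRaw (markChars rest) with
               | g :: t => (c :: g) :: t
               | [] => [[c]]) := by
          rw [hmark, if_neg hu]
          show groupRaw (c :: markChars rest) = _
          simp only [groupRaw, List.foldr_cons]
          rw [if_pos han]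
        have hst : stepA (cands, tok) c = (cands, tok ++ [c]) := by
          simp [stepA, hu, han]
        rw [hst, ih, hraw]
        cases hg : groupRaw (markChars rest) with
        | nil => exact absurd hg (groupRaw_ne_nil _)
        | cons g t => simp
      · have hraw : groupRaw (markChars (c :: rest)) = [] :: groupRaw (markChars rest) := by
          rw [hmark, if_neg hu]
          show groupRaw (c :: markChars rest) = _
          simp only [groupRaw, List.foldr_cons]
          rw [if_neg han]
        cases htok : tok with
        | nil =>
          have hst : stepA (cands, []) c = (cands, []) := by
            simp [stepA, hu, han]
          rw [hst, ih, hraw]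
          cases hg : groupRaw (markChars rest) with
          | nil => exact absurd hg (groupRaw_ne_nil _)
          | cons g t => simp [emitPiece_nil]
        | cons x xs =>
          have hst : stepA (cands, x :: xs) c = (cands ++ emitPiece (x :: xs), []) := by
            simp [stepA, hu, han]
          rw [hst, ih, hraw]
          cases hg : groupRaw (markChars rest) with
          | nil => exact absurd hg (groupRaw_ne_nil _)
          | cons g t => simp [emitPiece_nil]

-- dropping the empty boundary groups does not change the emitted pieces
theorem flatMap_groupRuns (cs : List Char) :
    (groupRuns cs).flatMap emitPiece = (groupRaw cs).flatMap emitPiece := by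
  unfold groupRuns
  induction groupRaw cs with
  | nil => simp
  | cons g t ih =>
    cases g with
    | nil => simpa [emitPiece_nil] using ih
    | cons x xs => simp [ih]

-- A's seen-set dedup loop = dict.fromkeys over the nonempty candidates
theorem dedup_loop_eq (xs : List String) : ∀ (l : List String),
    (xs.foldl dedupStepA (l, l)).1 = (xs.filter (fun c => c != "")).foldl PySem.Set.add l := by
  induction xs with
  | nil => intro l; simp
  | cons c rest ih =>
    intro l
    by_cases hc : c = ""
    · have h1 : dedupStepA (l, l) c = (l, l) := by simp [dedupStepA, hc]
      rw [List.foldl_cons, h1, ih]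
      simp [hc]
    · have hfilter : (c :: rest).filter (fun c => c != "") = c :: rest.filter (fun c => c != "") := by
        simp [hc]
      by_cases hm : c ∈ l
      · have h1 : dedupStepA (l, l) c = (l, l) := by
          simp [dedupStepA, PySem.Set.contains, hm]
        have h2 : PySem.Set.add l c = l := by simp [PySem.Set.add, PySem.Set.contains, hm]
        rw [List.foldl_cons, h1, hfilter, List.foldl_cons, h2, ih]
      · have h1 : dedupStepA (l, l) c = (l ++ [c], l ++ [c]) := by
          simp [dedupStepA, PySem.Set.contains, hm, hc, PySem.Set.add]
        have h2 : PySem.Set.add l c = l ++ [c] := by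
          simp [PySem.Set.add, PySem.Set.contains, hm]
        rw [List.foldl_cons, h1, hfilter, List.foldl_cons, h2, ih]

theorem ports_eq (s : String) :
    material_candidates_py s = material_candidates_py_alt s := by
  unfold material_candidates_py material_candidates_py_alt
  simp only []
  generalize (match textureAliases.get? (normKey s) with
    | some names => [normKey s] ++ names.map normKey
    | none => [normKey s]) = cands0
  have hmid : (s.toList.foldl stepA (cands0, [])).1
      ++ (if !(s.toList.foldl stepA (cands0, [])).2.isEmpty
          then emitPiece (s.toList.foldl stepA (cands0, [])).2 else [])
      = cands0 ++ (groupRuns (markChars s.toList)).flatMap emitPiece := by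
    rw [flatMap_groupRuns, tok_loop_eq]
    cases hg : groupRaw (markChars s.toList) with
    | nil => exact absurd hg (groupRaw_ne_nil _)
    | cons g t => simp
  have hded : ∀ ys : List String, (ys.foldl dedupStepA ([], PySem.Set.empty)).1
      = PySem.List.dedup (ys.filter (fun c => c != "")) := by
    intro ys
    rw [PySem.List.dedup_eq_ofList, PySem.Set.ofList_eq_foldl]
    exact dedup_loop_eq ys []
  rw [hded]
  refine congrArg _ (congrArg _ ?_)
  split
  · rw [hmid]
  · exact hmid

-- ===== VERDICT (by name: the statement is the Claim_ definition above) =====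
theorem material_candidates_py_spec : Claim_equal_material_candidates_py := by
  intro s _
  unfold Spec_material_candidates_py
  exact ports_eq s
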